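-- pv_equiv track=rewrite | github.com/Raffledoocious/Social-GeoTagging | cluster/tag.py | build_tag_dict
-- ===== SOURCE A (Python) =====
-- def build_tag_dict(photos):
--     """
--     Builds the tag dictionary
--     """
--     tags = {}
--
--     #build tag dictionary
--     for photo in photos:
--
--         photo_tags = photo['tags'].split(' ')
--
--         #update counts of all tags in the dictionary
--         for tag in photo_tags:
--             if not tag in tags:
--                 tags[tag] = {'count':1, 'color':None}
--             else:
--                 tags[tag]['count'] += 1
--
--     return tags
-- ===== SOURCE B (Python) =====
-- def build_tag_dict(photos):
--     """
--     Builds the tag dictionary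
--     """
--     # flatten every photo's tag string into one global tag list
--     all_tags = [t for photo in photos for t in photo['tags'].split(' ')]
--     # for each tag at its first occurrence, count it in the whole flat list
--     tags = {}
--     for t in all_tags:
--         if t not in tags:
--             tags[t] = {'count': all_tags.count(t), 'color': None}
--     return tags
-- ===== Notes on version B (the rewrite author's own statement) =====
-- stated objective: alternative
-- what changed: A maintains a running counter, mutating each tag's nested dict count as tags stream by; B instead flattens all tag strings into one global list and, at each tag's first occurrence, computes its total frequency with a whole-list list.count call, so no incremental count state is kept at all.
import Mathlib
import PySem

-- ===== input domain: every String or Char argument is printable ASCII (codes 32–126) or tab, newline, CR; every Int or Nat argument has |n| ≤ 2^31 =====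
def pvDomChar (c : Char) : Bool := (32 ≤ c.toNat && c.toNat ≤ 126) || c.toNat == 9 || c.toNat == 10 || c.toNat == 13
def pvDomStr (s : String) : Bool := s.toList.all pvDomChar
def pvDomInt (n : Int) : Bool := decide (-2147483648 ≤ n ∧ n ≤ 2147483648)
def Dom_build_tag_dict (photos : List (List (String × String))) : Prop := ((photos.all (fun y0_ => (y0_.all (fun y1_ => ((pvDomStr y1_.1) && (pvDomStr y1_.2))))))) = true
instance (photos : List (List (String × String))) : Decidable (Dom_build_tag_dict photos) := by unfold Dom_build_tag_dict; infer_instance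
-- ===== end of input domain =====

-- B replaces A's running per-tag counter by a flatten-then-count-on-first-occurrence pass (alternative algorithm; B is not faster).


-- ===== PORT A =====
-- tags[tag]['count'] += 1 : the inner dict always has a some-valued 'count' key; the
-- unreachable fall-through branches (KeyError / None + 1) leave the dict unchanged.
def pvBumpA (inner : PySem.Dict String (Option Int)) : PySem.Dict String (Option Int) :=
  match inner.get? "count" with
  | some (some n) => inner.insert "count" (some (n + 1))
  | _ => inner

-- loop body of A's inner 'for tag in photo_tags'
def pvStepA (tags : PySem.Dict String (PySem.Dict String (Option Int))) (tag : String) :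
    PySem.Dict String (PySem.Dict String (Option Int)) :=
  if tags.contains tag then
    tags.modify tag PySem.Dict.empty pvBumpA
  else
    tags.insert tag (PySem.Dict.ofList [("count", some 1), ("color", none)])

def build_tag_dict (photos : List (List (String × String))) : List (String × List (String × Option Int)) :=
  (photos.foldl
    (fun tags photo =>
      match photo.lookup "tags" with
      | none => tags  -- photo['tags'] raises KeyError here; excluded by Pre_
      | some s => ((PySem.Str.split? s " ").getD []).foldl pvStepA tags)  -- sep " " ≠ "" so split? is always some
    PySem.Dict.empty).items.map (fun p => (p.1, p.2.items))

-- ===== PORT B =====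
-- B's flattening comprehension: [t for photo in photos for t in photo['tags'].split(' ')]
def pvAllTags (photos : List (List (String × String))) : List String :=
  photos.flatMap (fun photo =>
    match photo.lookup "tags" with
    | none => []  -- photo['tags'] raises KeyError here; excluded by Pre_
    | some s => (PySem.Str.split? s " ").getD [])

-- loop body of B's 'for t in all_tags': on first occurrence, count t in the whole flat list
def pvStepB (all : List String) (tags : PySem.Dict String (PySem.Dict String (Option Int)))
    (t : String) : PySem.Dict String (PySem.Dict String (Option Int)) :=
  if tags.contains t then tags
  else tags.insert t (PySem.Dict.ofList [("count", some ((all.count t : Nat) : Int)), ("color", none)])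

def build_tag_dict_alt (photos : List (List (String × String))) : List (String × List (String × Option Int)) :=
  let all := pvAllTags photos
  (all.foldl (pvStepB all) PySem.Dict.empty).items.map (fun p => (p.1, p.2.items))

-- ===== PRECONDITION & SPEC =====
-- Pre_ excludes exactly the photos missing the 'tags' key, on which A (and B) raise KeyError.
def Pre_build_tag_dict (photos : List (List (String × String))) : Prop :=
  (photos.all (fun photo => (photo.lookup "tags").isSome)) = true
instance (photos : List (List (String × String))) : Decidable (Pre_build_tag_dict photos) := by
  unfold Pre_build_tag_dict; infer_instance

def pvWitness_build_tag_dict : (List (List (String × String))) := [[("tags", "a b a")], [("tags", "b c")]]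

def Spec_build_tag_dict (photos : List (List (String × String))) (out : List (String × List (String × Option Int))) : Prop := out = build_tag_dict_alt photos
instance (photos : List (List (String × String))) (out : List (String × List (String × Option Int))) : Decidable (Spec_build_tag_dict photos out) := by unfold Spec_build_tag_dict; infer_instance

-- ===== CLAIM (what is proved, stated in full; the proofs are below) =====
def Claim_equal_build_tag_dict : Prop := ∀ (photos : List (List (String × String))), Dom_build_tag_dict photos → Pre_build_tag_dict photos → Spec_build_tag_dict photos (build_tag_dict photos)

-- ===== LEMMAS AND PROOFS =====

-- the nested-dict value both programs associate with a tag of total count c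
def pvInner (c : Int) : PySem.Dict String (Option Int) :=
  PySem.Dict.ofList [("count", some c), ("color", none)]

lemma pvInner_mk (c : Int) : pvInner c = PySem.Dict.mk [("count", some c), ("color", none)] := rfl

lemma pvBumpA_inner (c : Int) : pvBumpA (pvInner c) = pvInner (c + 1) := by
  simp [pvBumpA, pvInner_mk, PySem.Dict.get?, PySem.Dict.insert, PySem.Dict.contains]

-- A's outer loop, flattened: folding pvStepA photo-by-photo is folding it over pvAllTags
lemma pvA_flatten (photos : List (List (String × String))) (d : PySem.Dict String (PySem.Dict String (Option Int))) :
    photos.foldl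
      (fun tags photo =>
        match photo.lookup "tags" with
        | none => tags
        | some s => ((PySem.Str.split? s " ").getD []).foldl pvStepA tags) d
    = (pvAllTags photos).foldl pvStepA d := by
  induction photos generalizing d with
  | nil => rfl
  | cons photo rest ih =>
    simp only [List.foldl_cons, pvAllTags, List.flatMap_cons, List.foldl_append]
    rcases photo.lookup "tags" with _ | s <;> exact ih _

-- the common normal form: first-seen distinct tags, each with its total count in ts
def pvSpecDict (ts : List String) : PySem.Dict String (PySem.Dict String (Option Int)) :=
  PySem.Dict.mk ((PySem.Set.ofList ts).map (fun t => (t, pvInner (ts.count t))))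

lemma pvContains_spec (ts done : List String) (t : String) :
    (PySem.Dict.mk ((PySem.Set.ofList done).map (fun t => (t, pvInner (ts.count t))))).contains t
      = decide (t ∈ done) := by
  simp [PySem.Dict.contains, List.any_map, Function.comp_def, PySem.Set.mem_ofList, List.any_beq']

-- A's fold reaches the normal form: invariant over the processed prefix 'done'
lemma pvA_char (rest : List String) : ∀ done : List String,
    rest.foldl pvStepA (PySem.Dict.mk ((PySem.Set.ofList done).map (fun t => (t, pvInner (done.count t)))))
      = PySem.Dict.mk ((PySem.Set.ofList (done ++ rest)).map (fun t => (t, pvInner ((done ++ rest).count t)))) := by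
  induction rest with
  | nil => intro done; simp
  | cons t rest ih =>
    intro done
    have hstep : pvStepA (PySem.Dict.mk ((PySem.Set.ofList done).map (fun s => (s, pvInner (done.count s))))) t
        = PySem.Dict.mk ((PySem.Set.ofList (done ++ [t])).map (fun s => (s, pvInner ((done ++ [t]).count s)))) := by
      unfold pvStepA
      rw [pvContains_spec]
      by_cases hm : t ∈ done
      · rw [if_pos (by simpa using hm)]
        rw [PySem.Set.ofList_append_singleton, PySem.Set.add_of_mem (by simpa [PySem.Set.mem_ofList] using hm)]
        rw [PySem.Dict.modify]
        have hget : (PySem.Dict.mk ((PySem.Set.ofList done).map (fun s => (s, pvInner (done.count s))))).getD t PySem.Dict.empty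
            = pvInner (done.count t) := by
          have hmem : (t, pvInner (done.count t))
              ∈ (PySem.Set.ofList done).map (fun s => (s, pvInner (done.count s))) :=
            List.mem_map_of_mem (by simpa [PySem.Set.mem_ofList] using hm)
          have hnd : (PySem.Dict.mk ((PySem.Set.ofList done).map (fun s => (s, pvInner (done.count s))))).keys.Nodup := by
            have hk : (PySem.Dict.mk ((PySem.Set.ofList done).map (fun s => (s, pvInner (done.count s))))).keys
                = PySem.Set.ofList done := by
              simp [PySem.Dict.keys, List.map_map, Function.comp_def]
            rw [hk]; exact PySem.Set.nodup_ofList done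
          exact PySem.Dict.getD_of_mem_items _ hmem hnd _
        rw [hget, pvBumpA_inner]
        apply PySem.Dict.ext
        rw [PySem.Dict.items_insert_of_contains _ _ (by rw [pvContains_spec]; simpa using hm)]
        simp only [List.map_map]
        apply List.map_congr_left
        intro s hs
        by_cases hst : s = t
        · subst hst; simp [List.count_append]
        · simp [List.count_append, hst, Ne.symm hst]
      · rw [if_neg (by simpa using hm)]
        rw [PySem.Set.ofList_append_singleton, PySem.Set.add_of_not_mem (by simpa [PySem.Set.mem_ofList] using hm)]
        apply PySem.Dict.ext
        rw [PySem.Dict.items_insert_of_not_contains _ _ (by rw [pvContains_spec]; simpa using hm)]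
        simp only [List.map_append, List.map_cons, List.map_nil]
        congr 1
        · apply List.map_congr_left
          intro s hs
          have hst : s ≠ t := fun h => hm (h ▸ (by simpa [PySem.Set.mem_ofList] using hs))
          simp [List.count_append, Ne.symm hst]
        · simp [pvInner, List.count_append, List.count_eq_zero_of_not_mem hm]
    rw [List.foldl_cons, hstep]
    have := ih (done ++ [t])
    simpa [List.append_assoc] using this

-- B's fold reaches the same normal form (counts are fixed to the full list 'all' throughout)
lemma pvB_char (all : List String) (rest : List String) : ∀ done : List String,
    rest.foldl (pvStepB all) (PySem.Dict.mk ((PySem.Set.ofList done).map (fun t => (t, pvInner (all.count t)))))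
      = PySem.Dict.mk ((PySem.Set.ofList (done ++ rest)).map (fun t => (t, pvInner (all.count t)))) := by
  induction rest with
  | nil => intro done; simp
  | cons t rest ih =>
    intro done
    have hstep : pvStepB all (PySem.Dict.mk ((PySem.Set.ofList done).map (fun s => (s, pvInner (all.count s))))) t
        = PySem.Dict.mk ((PySem.Set.ofList (done ++ [t])).map (fun s => (s, pvInner (all.count s)))) := by
      unfold pvStepB
      rw [pvContains_spec]
      by_cases hm : t ∈ done
      · rw [if_pos (by simpa using hm)]
        rw [PySem.Set.ofList_append_singleton, PySem.Set.add_of_mem (by simpa [PySem.Set.mem_ofList] using hm)]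
      · rw [if_neg (by simpa using hm)]
        rw [PySem.Set.ofList_append_singleton, PySem.Set.add_of_not_mem (by simpa [PySem.Set.mem_ofList] using hm)]
        apply PySem.Dict.ext
        rw [PySem.Dict.items_insert_of_not_contains _ _ (by rw [pvContains_spec]; simpa using hm)]
        simp [pvInner]
    rw [List.foldl_cons, hstep]
    simpa [List.append_assoc] using ih (done ++ [t])

-- ===== VERDICT (by name: the statement is the Claim_ definition above) =====
theorem build_tag_dict_spec : Claim_equal_build_tag_dict := by
  intro photos _ _
  unfold Spec_build_tag_dict build_tag_dict build_tag_dict_alt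
  rw [pvA_flatten]
  have hA := pvA_char (pvAllTags photos) []
  have hB := pvB_char (pvAllTags photos) (pvAllTags photos) []
  simp only [PySem.Set.ofList_nil, List.map_nil, List.nil_append] at hA hB
  have h0 : (PySem.Dict.empty : PySem.Dict String (PySem.Dict String (Option Int)))
      = PySem.Dict.mk [] := rfl
  dsimp only
  rw [h0, hA, hB]
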